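-- pv_equiv track=rewrite | github.com/sigmarion1/leetcode-top-interview-150 | leetcode-top-interview-150/36.py | isValidNumbers
-- ===== SOURCE A (Python) =====
-- from typing import List
--
-- def isValidNumbers(numbers: List[str]) -> bool:
--     values = set()
--
--     for number in numbers:
--         if number == ".":
--             continue
--         elif number in values:
--             return False
--         else:
--             values.add(number)
--
--     return True
-- ===== SOURCE B (Python) =====
-- from typing import List
--
-- def isValidNumbers(numbers: List[str]) -> bool:
--     s = sorted(n for n in numbers if n != ".")
--     return all(a != b for a, b in zip(s, s[1:]))
-- ===== Notes on version B (the rewrite author's own statement) =====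
-- stated objective: alternative
-- what changed: Replaces A's hash-set membership scan with early False return by sorting the non-dot strings and checking that no two adjacent elements of the sorted list are equal.
import Mathlib
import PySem

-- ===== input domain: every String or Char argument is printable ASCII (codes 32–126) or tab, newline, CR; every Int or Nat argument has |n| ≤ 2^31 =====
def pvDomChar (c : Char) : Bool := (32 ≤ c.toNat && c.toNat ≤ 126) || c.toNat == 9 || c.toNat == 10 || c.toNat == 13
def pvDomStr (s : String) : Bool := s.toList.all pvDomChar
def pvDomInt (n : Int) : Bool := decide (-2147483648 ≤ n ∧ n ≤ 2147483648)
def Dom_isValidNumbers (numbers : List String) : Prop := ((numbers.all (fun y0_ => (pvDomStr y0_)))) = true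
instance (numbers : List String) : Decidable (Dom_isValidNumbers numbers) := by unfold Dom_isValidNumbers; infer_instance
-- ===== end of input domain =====

-- B replaces A's hash-set membership scan with early False return by sorting the
-- non-dot strings and checking that no two adjacent sorted elements are equal
-- (objective: alternative algorithm).

-- ===== PORT A =====
-- A's loop over `numbers` carrying the set `values`, with early return False on a repeat.
def isValidNumbersLoop (rest : List String) (values : PySem.Set String) : Bool :=
  match rest with
  | [] => true
  | number :: rest' =>
    if number == "." then isValidNumbersLoop rest' values
    else if PySem.Set.contains values number then false
    else isValidNumbersLoop rest' (PySem.Set.add values number)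

def isValidNumbers (numbers : List String) : Bool :=
  isValidNumbersLoop numbers PySem.Set.empty

-- ===== PORT B =====
-- s = sorted(non-dot strings); all(a != b for a, b in zip(s, s[1:]))
def isValidNumbers_alt (numbers : List String) : Bool :=
  let s := PySem.List.sorted (numbers.filter (fun n => n ≠ ".")) (fun x => x) false
  (s.zip (PySem.List.slice s (some 1) none)).all (fun p => p.1 ≠ p.2)

-- ===== PRECONDITION & SPEC =====
def Spec_isValidNumbers (numbers : List String) (out : Bool) : Prop := out = isValidNumbers_alt numbers
instance (numbers : List String) (out : Bool) : Decidable (Spec_isValidNumbers numbers out) := by unfold Spec_isValidNumbers; infer_instance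

-- ===== CLAIM (what is proved, stated in full; the proofs are below) =====
def Claim_equal_isValidNumbers : Prop := ∀ (numbers : List String), Dom_isValidNumbers numbers → Spec_isValidNumbers numbers (isValidNumbers numbers)

-- ===== LEMMAS AND PROOFS =====

-- A's loop with accumulated set `values` returns true iff the non-dot elements are
-- pairwise distinct and none of them is already in `values`.
lemma isValidNumbersLoop_eq_true_iff (rest : List String) (values : List String) :
    isValidNumbersLoop rest values = true ↔
      ((rest.filter (fun n => n ≠ ".")).Nodup ∧
        ∀ x ∈ rest.filter (fun n => n ≠ "."), x ∉ values) := by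
  induction rest generalizing values with
  | nil => simp [isValidNumbersLoop]
  | cons number rest' ih =>
    by_cases hdot : number = "."
    · simp [isValidNumbersLoop, hdot, ih]
    · have hne : (number == ".") = false := by simp [hdot]
      by_cases hmem : number ∈ values
      · have hc : PySem.Set.contains values number = true := by
          simp [PySem.Set.contains, hmem]
        simp only [isValidNumbersLoop, hne, Bool.false_eq_true, if_false, hc, if_true]
        constructor
        · intro h; exact absurd h (by simp)
        · rintro ⟨-, h⟩
          exact absurd hmem (h number (by simp [hdot]))
      · have hc : PySem.Set.contains values number = false := by
          simp [PySem.Set.contains, hmem]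
        have hadd : PySem.Set.add values number = values ++ [number] := by
          simp [PySem.Set.add, PySem.Set.contains, hmem]
        simp only [isValidNumbersLoop, hne, Bool.false_eq_true, if_false, hc, hadd, ih]
        simp only [List.filter_cons, hdot, ne_eq, not_false_iff, decide_true, if_true]
        constructor
        · rintro ⟨hnd, h⟩
          refine ⟨List.nodup_cons.mpr ⟨fun hx => ?_, hnd⟩, ?_⟩
          · have := h number hx; simp at this
          · intro x hx
            rcases List.mem_cons.mp hx with rfl | hx'
            · exact hmem
            · intro hv; exact (h x hx') (by simp [hv])
        · rintro ⟨hnd, h⟩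
          rcases List.nodup_cons.mp hnd with ⟨hnmem, hnd'⟩
          refine ⟨hnd', fun x hx hv => ?_⟩
          rcases List.mem_append.mp hv with hv' | hv'
          · exact h x (List.mem_cons_of_mem _ hx) hv'
          · simp at hv'; subst hv'; exact hnmem hx

-- all(a != b for (a,b) in zip(t, t.tail)) is exactly "no two adjacent elements equal".
lemma zip_tail_all_ne_iff_isChain (t : List String) :
    (t.zip t.tail).all (fun p => p.1 ≠ p.2) = true ↔ List.IsChain (· ≠ ·) t := by
  induction t with
  | nil => simp
  | cons a t ih =>
    cases t with
    | nil => simp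
    | cons b t' =>
      rw [List.isChain_cons_cons, ← ih]
      simp

-- On a nondecreasing list, adjacent inequality forces global strict increase.
lemma pairwise_lt_of_isChain_ne (t : List String)
    (hp : t.Pairwise (· ≤ ·)) (hc : List.IsChain (· ≠ ·) t) : t.Pairwise (· < ·) := by
  induction t with
  | nil => exact List.Pairwise.nil
  | cons a t ih =>
    rcases List.pairwise_cons.mp hp with ⟨ha, hp'⟩
    cases t with
    | nil => simp
    | cons b t' =>
      rcases List.isChain_cons_cons.mp hc with ⟨hab, hc'⟩
      have hlt : a < b := lt_of_le_of_ne (ha b (by simp)) hab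
      have htail := ih hp' hc'
      refine List.pairwise_cons.mpr ⟨?_, htail⟩
      intro c hc''
      rcases List.mem_cons.mp hc'' with rfl | hmem
      · exact hlt
      · exact lt_of_lt_of_le hlt
          ((List.pairwise_cons.mp hp').1 c hmem)

-- On a nondecreasing list, "no adjacent equal pair" is exactly Nodup.
lemma isChain_ne_iff_nodup (t : List String) (hp : t.Pairwise (· ≤ ·)) :
    List.IsChain (· ≠ ·) t ↔ t.Nodup := by
  constructor
  · intro hc
    exact (pairwise_lt_of_isChain_ne t hp hc).imp (fun h => ne_of_lt h)
  · intro hnd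
    exact List.Pairwise.isChain hnd

-- B's comparison is true iff the filtered list has no duplicates.
lemma alt_eq_true_iff (numbers : List String) :
    isValidNumbers_alt numbers = true ↔ (numbers.filter (fun n => n ≠ ".")).Nodup := by
  show ((PySem.List.sorted (numbers.filter (fun n => n ≠ ".")) (fun x => x) false).zip
      (PySem.List.slice (PySem.List.sorted (numbers.filter (fun n => n ≠ ".")) (fun x => x) false)
        (some 1) none)).all (fun p => p.1 ≠ p.2) = true ↔ _
  rw [PySem.List.slice_from_one, zip_tail_all_ne_iff_isChain,
    isChain_ne_iff_nodup _ (PySem.List.sorted_pairwise (numbers.filter (fun n => n ≠ ".")) (fun x => x))]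
  exact (PySem.List.sorted_perm (numbers.filter (fun n => n ≠ ".")) (fun x => x) false).nodup_iff

-- ===== VERDICT (by name: the statement is the Claim_ definition above) =====
theorem isValidNumbers_spec : Claim_equal_isValidNumbers := by
  intro numbers _
  unfold Spec_isValidNumbers
  rw [Bool.eq_iff_iff]
  rw [show isValidNumbers numbers = isValidNumbersLoop numbers PySem.Set.empty from rfl]
  rw [isValidNumbersLoop_eq_true_iff, alt_eq_true_iff]
  simp [PySem.Set.empty]
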